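-- pv_equiv track=rewrite | github.com/4th-year-group-project/Terra-Infinity | real_rivers/river_network.py | get_max_depth
-- ===== SOURCE A (Python) =====
-- from collections import defaultdict, deque
--
-- def get_max_depth(neighbors, boundary_nodes, ocean_nodes):
--     visited = set()
--     max_depth = 0
--
--     for node in boundary_nodes:
--         if node not in visited:
--             queue = deque([(node, 0)])
--             visited.add(node)
--
--             while queue:
--                 current, depth = queue.popleft()
--                 max_depth = max(max_depth, depth)
--
--                 for neighbor in neighbors[current]:
--                     if neighbor not in visited and neighbor not in ocean_nodes:
--                         visited.add(neighbor)
--                         queue.append((neighbor, depth + 1))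
--
--     return max_depth
-- ===== SOURCE B (Python) =====
-- def get_max_depth(neighbors, boundary_nodes, ocean_nodes):
--     visited = set()
--     max_depth = 0
--     for node in boundary_nodes:
--         if node not in visited:
--             reached = {node}
--             depth = 0
--             while True:
--                 new = set()
--                 for u in reached:
--                     for v in neighbors[u]:
--                         if v not in reached and v not in visited and v not in ocean_nodes:
--                             new.add(v)
--                 if not new:
--                     break
--                 reached |= new
--                 depth += 1
--             visited |= reached
--             if depth > max_depth:
--                 max_depth = depth
--     return max_depth
-- ===== Notes on version B (the rewrite author's own statement) =====
-- stated objective: alternative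
-- what changed: A's multi-source BFS with a FIFO deque of (node, depth) pairs is replaced by a round-based reachability closure: per source, each round re-expands the whole reached set at once into a fresh 'new' set, the reached set grows by it, and the answer is the number of growth rounds; no queue or per-node depth tags are kept.
-- outside the precondition, e.g. on get_max_depth({1: [], 2: [9], 3: [2]}, [1], set()): A returns 0, B returns 0
import Mathlib
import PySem

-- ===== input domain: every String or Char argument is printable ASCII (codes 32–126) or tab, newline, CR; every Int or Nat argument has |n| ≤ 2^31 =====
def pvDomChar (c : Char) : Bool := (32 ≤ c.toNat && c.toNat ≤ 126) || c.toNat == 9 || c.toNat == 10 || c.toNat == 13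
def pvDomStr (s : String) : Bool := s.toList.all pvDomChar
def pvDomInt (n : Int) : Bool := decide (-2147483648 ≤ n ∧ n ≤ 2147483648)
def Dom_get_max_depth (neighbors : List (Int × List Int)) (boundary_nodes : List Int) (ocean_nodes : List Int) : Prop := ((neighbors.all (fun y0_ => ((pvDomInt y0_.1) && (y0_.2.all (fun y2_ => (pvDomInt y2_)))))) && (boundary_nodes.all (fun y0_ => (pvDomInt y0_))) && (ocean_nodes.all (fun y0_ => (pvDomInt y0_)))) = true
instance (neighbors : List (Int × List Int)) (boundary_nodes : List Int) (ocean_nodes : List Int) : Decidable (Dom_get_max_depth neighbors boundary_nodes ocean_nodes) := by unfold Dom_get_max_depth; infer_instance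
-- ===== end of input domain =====

-- B replaces A's queue-based BFS by a round-based reachability closure (no queue, no frontier:
-- each round scans the whole edge list and grows a reached set; depth = number of growth rounds).

-- ===== PORT A =====

-- neighbors[current] : first-match dict lookup; a missing key is Python's KeyError,
-- excluded by Pre_get_max_depth (the [] default is never used inside Pre_).
def pvAdj (neighbors : List (Int × List Int)) (c : Int) : List Int :=
  PySem.Dict.getD (PySem.Dict.mk neighbors) c []

-- total adjacency size; only used to build the fuel (a totality guard that is never exhausted)
def pvTotal (neighbors : List (Int × List Int)) : Nat :=
  (neighbors.map (fun p => p.2.length)).sum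

-- body of A's inner 'for neighbor in neighbors[current]'
def pvStepA (ocean_nodes : List Int) (d : Int) (s : List Int × List (Int × Int)) (nb : Int) :
    List Int × List (Int × Int) :=
  if (!PySem.Set.contains s.1 nb) && (!ocean_nodes.contains nb) then
    (PySem.Set.add s.1 nb, s.2 ++ [(nb, d + 1)])
  else s

-- A's 'while queue' loop; fuel is only a totality guard (proved never exhausted)
def pvLoopA (neighbors : List (Int × List Int)) (ocean_nodes : List Int) :
    Nat → List Int → Int → List (Int × Int) → List Int × Int
  | 0, v, m, _ => (v, m)
  | _ + 1, v, m, [] => (v, m)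
  | f + 1, v, m, (c, d) :: q =>
      let m' := max m d
      let s := (pvAdj neighbors c).foldl (pvStepA ocean_nodes d) (v, q)
      pvLoopA neighbors ocean_nodes f s.1 m' s.2

def get_max_depth (neighbors : List (Int × List Int)) (boundary_nodes : List Int) (ocean_nodes : List Int) : Int :=
  (boundary_nodes.foldl
    (fun (s : List Int × Int) node =>
      if PySem.Set.contains s.1 node then s
      else pvLoopA neighbors ocean_nodes (boundary_nodes.length + pvTotal neighbors + 1)
            (PySem.Set.add s.1 node) s.2 [(node, 0)])
    (PySem.Set.empty, 0)).2

-- ===== PORT B =====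

-- B's innermost 'for v in adj' : collect fresh non-ocean targets into 'new'
def pvCollect (ocean_nodes : List Int) (visited reached : List Int) (acc : List Int) (adj : List Int) : List Int :=
  adj.foldl (fun acc t =>
    if (!PySem.Set.contains reached t) && (!PySem.Set.contains visited t) && (!ocean_nodes.contains t)
    then PySem.Set.add acc t else acc) acc

-- one full round 'for u in reached: for v in neighbors[u]': every reached node is looked up
-- (a missing key is Python's KeyError, excluded by Pre_; 'new' only collects a set, so the
-- iteration order over the reached set cannot influence it)
def pvScan (neighbors : List (Int × List Int)) (ocean_nodes : List Int) (visited reached : List Int) : List Int :=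
  reached.foldl (fun acc u => pvCollect ocean_nodes visited reached acc (pvAdj neighbors u))
    PySem.Set.empty

-- B's 'while True' closure loop; fuel is only a totality guard (proved never exhausted)
def pvClosure (neighbors : List (Int × List Int)) (ocean_nodes : List Int) :
    Nat → List Int → List Int → Int → List Int × Int
  | 0, _, reached, depth => (reached, depth)
  | f + 1, visited, reached, depth =>
      let nw := pvScan neighbors ocean_nodes visited reached
      if nw.isEmpty then (reached, depth)
      else pvClosure neighbors ocean_nodes f visited (PySem.Set.update reached nw) (depth + 1)

def get_max_depth_alt (neighbors : List (Int × List Int)) (boundary_nodes : List Int) (ocean_nodes : List Int) : Int :=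
  (boundary_nodes.foldl
    (fun (s : List Int × Int) node =>
      if PySem.Set.contains s.1 node then s
      else
        let r := pvClosure neighbors ocean_nodes (pvTotal neighbors + 1) s.1 [node] 0
        (PySem.Set.update s.1 r.1, if r.2 > s.2 then r.2 else s.2))
    (PySem.Set.empty, 0)).2

-- ===== PRECONDITION & SPEC =====
-- With no boundary nodes A touches nothing and returns 0, so those inputs are all admitted.
-- Otherwise: A raises KeyError exactly when it EXPANDS a node that is not a key of neighbors;
-- which mentioned nodes get expanded depends on reachability (not closed-form), so Pre_ requires
-- every boundary node and every non-ocean adjacency target to be a key.  This is slightly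
-- stronger than necessary: inputs whose only dangling non-ocean targets sit in unreachable
-- adjacency lists are excluded although A returns there (see claim.json "cites"); entries whose
-- key is neither a boundary node nor a non-ocean target anywhere can never be expanded, so
-- they are exempt from that requirement.  Pre_ also
-- requires the keys of the association list to be distinct: a Python dict cannot have
-- duplicate keys, so a duplicate-key list does not represent any input of the Python function.
def Pre_get_max_depth (neighbors : List (Int × List Int)) (boundary_nodes : List Int) (ocean_nodes : List Int) : Prop :=
  boundary_nodes = [] ∨
  ((neighbors.map Prod.fst).Nodup ∧
   (∀ b ∈ boundary_nodes, b ∈ neighbors.map Prod.fst) ∧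
   (∀ p ∈ neighbors, (p.1 ∈ boundary_nodes ∨ (p.1 ∈ neighbors.flatMap Prod.snd ∧ p.1 ∉ ocean_nodes)) →
      ∀ x ∈ p.2, x ∉ ocean_nodes → x ∈ neighbors.map Prod.fst))

instance (neighbors : List (Int × List Int)) (boundary_nodes : List Int) (ocean_nodes : List Int) : Decidable (Pre_get_max_depth neighbors boundary_nodes ocean_nodes) := by unfold Pre_get_max_depth; infer_instance

def pvWitness_get_max_depth : (List (Int × List Int)) × List Int × List Int :=
  ([(1, [2]), (2, [])], [1], [])

def Spec_get_max_depth (neighbors : List (Int × List Int)) (boundary_nodes : List Int) (ocean_nodes : List Int) (out : Int) : Prop := out = get_max_depth_alt neighbors boundary_nodes ocean_nodes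
instance (neighbors : List (Int × List Int)) (boundary_nodes : List Int) (ocean_nodes : List Int) (out : Int) : Decidable (Spec_get_max_depth neighbors boundary_nodes ocean_nodes out) := by unfold Spec_get_max_depth; infer_instance

-- ===== CLAIM (what is proved, stated in full; the proofs are below) =====
def Claim_equal_get_max_depth : Prop := ∀ (neighbors : List (Int × List Int)) (boundary_nodes : List Int) (ocean_nodes : List Int), Dom_get_max_depth neighbors boundary_nodes ocean_nodes → Pre_get_max_depth neighbors boundary_nodes ocean_nodes → Spec_get_max_depth neighbors boundary_nodes ocean_nodes (get_max_depth neighbors boundary_nodes ocean_nodes)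

-- ===== LEMMAS AND PROOFS =====

-- ---- proof-only middleman: the level-synchronous form of A's BFS ----
def pvStepB (O : List Int) (s : List Int × List Int) (nb : Int) : List Int × List Int :=
  if (!PySem.Set.contains s.1 nb) && (!O.contains nb) then
    (PySem.Set.add s.1 nb, s.2 ++ [nb])
  else s

def pvLevel (neighbors : List (Int × List Int)) (ocean_nodes : List Int)
    (s : List Int × List Int) (cur : Int) : List Int × List Int :=
  (pvAdj neighbors cur).foldl (pvStepB ocean_nodes) s

def pvLoopB (neighbors : List (Int × List Int)) (ocean_nodes : List Int)
    (f : Nat) (v : List Int) (m : Int) (fr : List Int) (d : Int) : List Int × Int :=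
  match fr, f with
  | [], _ => (v, m)
  | _ :: _, 0 => (v, m)
  | c :: fr', g + 1 =>
      let m' := if d > m then d else m
      let s := (c :: fr').foldl (pvLevel neighbors ocean_nodes) (v, ([] : List Int))
      pvLoopB neighbors ocean_nodes (g - fr'.length) s.1 m' s.2 (d + 1)
termination_by f
decreasing_by omega

-- the finite pool every node enqueued by the inner loops comes from
def pvU (neighbors : List (Int × List Int)) : Finset Int :=
  (neighbors.flatMap Prod.snd).toFinset

theorem pvAdj_mem_flatMap (neighbors : List (Int × List Int)) (c x : Int)
    (hx : x ∈ pvAdj neighbors c) : x ∈ neighbors.flatMap Prod.snd := by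
  unfold pvAdj PySem.Dict.getD PySem.Dict.get? at hx
  cases hf : List.find? (fun p => p.1 == c) (PySem.Dict.mk neighbors).items with
  | none => rw [hf] at hx; simp at hx
  | some p =>
      rw [hf] at hx
      simp only [Option.map_some, Option.getD_some] at hx
      have hp : p ∈ neighbors := List.mem_of_find?_eq_some hf
      exact List.mem_flatMap.mpr ⟨p, hp, hx⟩

-- accumulator shift for the middleman's inner fold
theorem pvStepB_shift (O : List Int) (adjl : List Int) (s : List Int × List Int) :
    adjl.foldl (pvStepB O) s
      = ((adjl.foldl (pvStepB O) (s.1, [])).1,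
         s.2 ++ (adjl.foldl (pvStepB O) (s.1, [])).2) := by
  induction adjl generalizing s with
  | nil => simp
  | cons nb rest ih =>
      simp only [List.foldl_cons, pvStepB]
      by_cases hc : ((!PySem.Set.contains s.1 nb) && (!O.contains nb)) = true
      · rw [if_pos hc, if_pos hc, ih (PySem.Set.add s.1 nb, s.2 ++ [nb]),
            ih (PySem.Set.add s.1 nb, [] ++ [nb])]
        simp
      · rw [if_neg hc, if_neg hc]
        exact ih (s.1, s.2)

-- A's inner fold in terms of the middleman's inner fold
theorem pvStepA_eq_stepB (O : List Int) (d : Int) (adjl v : List Int) (q : List (Int × Int)) :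
    adjl.foldl (pvStepA O d) (v, q)
      = ((adjl.foldl (pvStepB O) (v, [])).1,
         q ++ (adjl.foldl (pvStepB O) (v, [])).2.map (fun n => (n, d + 1))) := by
  induction adjl generalizing v q with
  | nil => simp
  | cons nb rest ih =>
      simp only [List.foldl_cons, pvStepA, pvStepB]
      by_cases hc : ((!PySem.Set.contains v nb) && (!O.contains nb)) = true
      · rw [if_pos hc, if_pos hc, ih (PySem.Set.add v nb) (q ++ [(nb, d + 1)]),
            pvStepB_shift O rest (PySem.Set.add v nb, [] ++ [nb])]
        simp
      · rw [if_neg hc, if_neg hc]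
        exact ih v q

-- what one expansion produces: visited grows by exactly the fresh nodes collected
theorem pvExpand_props (O : List Int) (adjl v : List Int) :
    (adjl.foldl (pvStepB O) (v, [])).1 = v ++ (adjl.foldl (pvStepB O) (v, [])).2
  ∧ (adjl.foldl (pvStepB O) (v, [])).2.Nodup
  ∧ ∀ x ∈ (adjl.foldl (pvStepB O) (v, [])).2, x ∈ adjl ∧ x ∉ v := by
  induction adjl generalizing v with
  | nil => simp
  | cons nb rest ih =>
      simp only [List.foldl_cons, pvStepB]
      by_cases hc : ((!PySem.Set.contains v nb) && (!O.contains nb)) = true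
      · have hnb : nb ∉ v := by
          have := ((Bool.and_eq_true _ _).mp hc).1
          simpa [PySem.Set.contains] using this
        have hadd : PySem.Set.add v nb = v ++ [nb] := by
          simp [PySem.Set.add, PySem.Set.contains, hnb]
        rw [if_pos hc, hadd, pvStepB_shift O rest (v ++ [nb], [] ++ [nb])]
        obtain ⟨h1, h2, h3⟩ := ih (v ++ [nb])
        refine ⟨?_, ?_, ?_⟩
        · simp only [List.nil_append]
          rw [h1]; simp
        · simp only [List.nil_append, List.cons_append, List.nil_append, List.nodup_cons]
          exact ⟨fun hmem => by simpa using (h3 _ hmem).2, h2⟩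
        · intro x hx
          simp only [List.nil_append, List.cons_append, List.nil_append] at hx
          rcases List.mem_cons.mp hx with rfl | hx
          · exact ⟨List.mem_cons_self, hnb⟩
          · have := h3 x hx
            exact ⟨List.mem_cons_of_mem _ this.1, fun hv => this.2 (by simp [hv])⟩
      · rw [if_neg hc]
        obtain ⟨h1, h2, h3⟩ := ih v
        exact ⟨h1, h2, fun x hx => ⟨List.mem_cons_of_mem _ (h3 x hx).1, (h3 x hx).2⟩⟩

-- accumulator shift for a whole level
theorem pvLevel_shift (neighbors : List (Int × List Int)) (O : List Int) (L : List Int)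
    (s : List Int × List Int) :
    L.foldl (pvLevel neighbors O) s
      = ((L.foldl (pvLevel neighbors O) (s.1, [])).1,
         s.2 ++ (L.foldl (pvLevel neighbors O) (s.1, [])).2) := by
  induction L generalizing s with
  | nil => simp
  | cons c rest ih =>
      simp only [List.foldl_cons, pvLevel]
      rw [pvStepB_shift O (pvAdj neighbors c) s]
      rw [ih (((pvAdj neighbors c).foldl (pvStepB O) (s.1, [])).1,
            s.2 ++ ((pvAdj neighbors c).foldl (pvStepB O) (s.1, [])).2)]
      rw [ih ((pvAdj neighbors c).foldl (pvStepB O) (s.1, []))]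
      dsimp only
      simp

-- expanding a whole level: fresh nodes, all from the pool, none previously visited
theorem pvLevelExpand_props (neighbors : List (Int × List Int)) (O : List Int) (L v : List Int) :
    (L.foldl (pvLevel neighbors O) (v, [])).1 = v ++ (L.foldl (pvLevel neighbors O) (v, [])).2
  ∧ (L.foldl (pvLevel neighbors O) (v, [])).2.Nodup
  ∧ ∀ x ∈ (L.foldl (pvLevel neighbors O) (v, [])).2, x ∈ pvU neighbors ∧ x ∉ v := by
  induction L generalizing v with
  | nil => simp
  | cons c rest ih =>
      simp only [List.foldl_cons, pvLevel]
      obtain ⟨e1, e2, e3⟩ := pvExpand_props O (pvAdj neighbors c) v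
      rw [pvLevel_shift neighbors O rest ((pvAdj neighbors c).foldl (pvStepB O) (v, []))]
      rw [e1]
      obtain ⟨h1, h2, h3⟩ :=
        ih (v ++ ((pvAdj neighbors c).foldl (pvStepB O) (v, [])).2)
      refine ⟨?_, ?_, ?_⟩
      · rw [h1]; simp
      · refine List.Nodup.append e2 h2 ?_
        intro x hx hx'
        exact (h3 x hx').2 (by simp [hx])
      · intro x hx
        rcases List.mem_append.mp hx with hx | hx
        · refine ⟨?_, (e3 x hx).2⟩
          exact List.mem_toFinset.mpr (pvAdj_mem_flatMap neighbors c x (e3 x hx).1)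
        · have := h3 x hx
          exact ⟨this.1, fun hv => this.2 (by simp [hv])⟩

-- counting: the unvisited pool shrinks by exactly the number of fresh nodes
theorem pvCard_step (U : Finset Int) (v new : List Int) (hnd : new.Nodup)
    (hmem : ∀ x ∈ new, x ∈ U ∧ x ∉ v) :
    (U \ (v ++ new).toFinset).card + new.length = (U \ v.toFinset).card := by
  have hsub : new.toFinset ⊆ U \ v.toFinset := by
    intro x hx
    have hx' := List.mem_toFinset.mp hx
    exact Finset.mem_sdiff.mpr ⟨(hmem x hx').1, fun h => (hmem x hx').2 (List.mem_toFinset.mp h)⟩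
  have hU : U \ (v.toFinset ∪ new.toFinset) = (U \ v.toFinset) \ new.toFinset := by
    rw [Finset.sdiff_union_distrib]
    exact (Finset.sdiff_sdiff_left' U v.toFinset new.toFinset).symm
  have hcard : new.toFinset.card = new.length := List.toFinset_card_of_nodup hnd
  have hle : new.toFinset.card ≤ (U \ v.toFinset).card := Finset.card_le_card hsub
  rw [List.toFinset_append, hU, Finset.card_sdiff_of_subset hsub, hcard]
  omega

-- one whole level of A's queue loop, collapsed into one level expansion
theorem pvLevelStep (neighbors : List (Int × List Int)) (O : List Int) (d : Int) :
    ∀ (L : List Int) (f : Nat) (L2 v : List Int) (m : Int), L.length ≤ f →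
    pvLoopA neighbors O f v m (L.map (fun n => (n, d)) ++ L2.map (fun n => (n, d + 1)))
      = pvLoopA neighbors O (f - L.length) (L.foldl (pvLevel neighbors O) (v, [])).1
          (if L.isEmpty then m else max m d)
          ((L2 ++ (L.foldl (pvLevel neighbors O) (v, [])).2).map (fun n => (n, d + 1))) := by
  intro L
  induction L with
  | nil => intro f L2 v m _; simp
  | cons c L' ih =>
      intro f L2 v m hf
      have hf' : L'.length + 1 ≤ f := by simpa using hf
      obtain ⟨g, rfl⟩ : ∃ g, f = g + 1 := ⟨f - 1, by omega⟩
      simp only [List.map_cons, List.cons_append, pvLoopA]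
      rw [pvStepA_eq_stepB O d (pvAdj neighbors c) v]
      have hq : (L'.map (fun n => (n, d)) ++ L2.map (fun n => (n, d + 1))) ++
            ((pvAdj neighbors c).foldl (pvStepB O) (v, [])).2.map (fun n => (n, d + 1))
          = L'.map (fun n => (n, d)) ++
            (L2 ++ ((pvAdj neighbors c).foldl (pvStepB O) (v, [])).2).map (fun n => (n, d + 1)) := by
        simp
      rw [hq, ih g _ _ _ (by omega)]
      have hfuel : g + 1 - (c :: L').length = g - L'.length := by simp
      rw [hfuel]
      have hmax : (if L'.isEmpty then max m d else max (max m d) d) = max m d := by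
        cases L' with
        | nil => simp
        | cons a b => simp only [List.isEmpty_cons, if_neg Bool.false_ne_true]; rw [max_assoc, max_self]
      rw [hmax]
      simp only [List.isEmpty_cons, if_neg Bool.false_ne_true]
      simp only [List.foldl_cons, pvLevel]
      rw [pvLevel_shift neighbors O L' ((pvAdj neighbors c).foldl (pvStepB O) (v, []))]
      simp

-- A's queue loop equals the middleman level loop, level by level
theorem pvLoopAB (neighbors : List (Int × List Int)) (O : List Int) :
    ∀ (f : Nat) (L v : List Int) (m d : Int),
    L.length + ((pvU neighbors) \ v.toFinset).card ≤ f →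
    pvLoopA neighbors O f v m (L.map (fun n => (n, d))) = pvLoopB neighbors O f v m L d := by
  intro f
  induction f using Nat.strong_induction_on with
  | _ f ih =>
    intro L v m d h
    cases L with
    | nil => cases f <;> simp [pvLoopA, pvLoopB]
    | cons c L' =>
      have hlen : L'.length + 1 + (pvU neighbors \ v.toFinset).card ≤ f := by simpa using h
      obtain ⟨g, rfl⟩ : ∃ g, f = g + 1 := ⟨f - 1, by omega⟩
      have hstep := pvLevelStep neighbors O d (c :: L') (g + 1) [] v m (by simp; omega)
      simp only [List.map_nil, List.append_nil, List.nil_append] at hstep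
      rw [hstep]
      rw [pvLoopB]
      obtain ⟨e1, e2, e3⟩ := pvLevelExpand_props neighbors O (c :: L') v
      have hcard := pvCard_step (pvU neighbors) v
        ((c :: L').foldl (pvLevel neighbors O) (v, [])).2 e2 e3
      have hmax : (max m d) = if d > m then d else m := by
        split_ifs with hd
        · exact max_eq_right hd.le
        · exact max_eq_left (not_lt.mp hd)
      have hfuel : g + 1 - (c :: L').length = g - L'.length := by simp
      rw [hfuel, hmax]
      have hbound : ((c :: L').foldl (pvLevel neighbors O) (v, [])).2.length +
          (pvU neighbors \ (((c :: L').foldl (pvLevel neighbors O) (v, [])).1).toFinset).card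
          ≤ g - L'.length := by
        rw [e1]
        omega
      exact ih (g - L'.length) (by omega) _ _ _ _ hbound

theorem pvU_card_le (neighbors : List (Int × List Int)) :
    (pvU neighbors).card ≤ pvTotal neighbors := by
  unfold pvU pvTotal
  calc (neighbors.flatMap Prod.snd).toFinset.card
      ≤ (neighbors.flatMap Prod.snd).length := List.toFinset_card_le _
    _ = _ := by rw [List.length_flatMap]

-- A's outer fold rewritten through the middleman level loop
theorem pv_outerAB (neighbors : List (Int × List Int)) (O : List Int) (F : Nat)
    (hF : (pvU neighbors).card + 1 ≤ F) :
    ∀ (l : List Int) (s : List Int × Int),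
    l.foldl (fun (s : List Int × Int) node =>
        if PySem.Set.contains s.1 node then s
        else pvLoopA neighbors O F (PySem.Set.add s.1 node) s.2 [(node, 0)]) s
    = l.foldl (fun (s : List Int × Int) node =>
        if PySem.Set.contains s.1 node then s
        else pvLoopB neighbors O F (PySem.Set.add s.1 node) s.2 [node] 0) s := by
  intro l
  induction l with
  | nil => intro s; rfl
  | cons c rest ih =>
      intro s
      simp only [List.foldl_cons]
      by_cases hc : PySem.Set.contains s.1 c = true
      · rw [if_pos hc, if_pos hc]; exact ih _
      · rw [if_neg hc, if_neg hc]
        rw [show [((c : Int), (0 : Int))] = [c].map (fun n => (n, (0 : Int))) from rfl]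
        rw [pvLoopAB neighbors O F [c] (PySem.Set.add s.1 c) s.2 0 ?_]
        · exact ih _
        · have hle := Finset.card_le_card
            (Finset.sdiff_subset (s := pvU neighbors) (t := (PySem.Set.add s.1 c).toFinset))
          simp only [List.length_cons, List.length_nil]
          omega

-- ---- membership characterizations ----

theorem pvStepB_fst (O : List Int) (adjl v : List Int) :
    (adjl.foldl (pvStepB O) (v, [])).1 = v ++ (adjl.foldl (pvStepB O) (v, [])).2 := by
  induction adjl generalizing v with
  | nil => simp
  | cons nb rest ih =>
      simp only [List.foldl_cons, pvStepB]
      by_cases hc : ((!PySem.Set.contains v nb) && (!O.contains nb)) = true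
      · have hnb : nb ∉ v := by
          have := ((Bool.and_eq_true _ _).mp hc).1
          simpa [PySem.Set.contains] using this
        have hadd : PySem.Set.add v nb = v ++ [nb] := by
          simp [PySem.Set.add, PySem.Set.contains, hnb]
        rw [if_pos hc, hadd, pvStepB_shift O rest (v ++ [nb], [] ++ [nb])]
        dsimp only
        rw [ih (v ++ [nb])]
        simp
      · rw [if_neg hc]
        exact ih v

theorem pvStepB_mem (O : List Int) (adjl v : List Int) (x : Int) :
    x ∈ (adjl.foldl (pvStepB O) (v, [])).2 ↔ x ∈ adjl ∧ x ∉ v ∧ x ∉ O := by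
  induction adjl generalizing v with
  | nil => simp
  | cons nb rest ih =>
      simp only [List.foldl_cons, pvStepB]
      by_cases hc : ((!PySem.Set.contains v nb) && (!O.contains nb)) = true
      · have hnb : nb ∉ v := by
          have := ((Bool.and_eq_true _ _).mp hc).1
          simpa [PySem.Set.contains] using this
        have hno : nb ∉ O := by
          have := ((Bool.and_eq_true _ _).mp hc).2
          simpa using this
        have hadd : PySem.Set.add v nb = v ++ [nb] := by
          simp [PySem.Set.add, PySem.Set.contains, hnb]
        rw [if_pos hc, hadd, pvStepB_shift O rest (v ++ [nb], [] ++ [nb])]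
        simp only [List.nil_append, List.cons_append, List.mem_cons, ih (v ++ [nb])]
        constructor
        · rintro (rfl | ⟨h1, h2, h3⟩)
          · exact ⟨Or.inl rfl, hnb, hno⟩
          · exact ⟨Or.inr h1, fun hv => h2 (by simp [hv]), h3⟩
        · rintro ⟨h1, h2, h3⟩
          by_cases hx : x = nb
          · exact Or.inl hx
          · rcases h1 with rfl | h1
            · exact Or.inl rfl
            · refine Or.inr ⟨h1, ?_, h3⟩
              intro hv
              rcases List.mem_append.mp hv with hv | hv
              · exact h2 hv
              · exact hx (by simpa using hv)
      · rw [if_neg hc]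
        have hnbv : nb ∈ v ∨ nb ∈ O := by
          by_contra hcon
          push Not at hcon
          exact hc (by simp [PySem.Set.contains, hcon.1, hcon.2])
        rw [ih v]
        constructor
        · rintro ⟨h1, h2, h3⟩
          exact ⟨List.mem_cons_of_mem _ h1, h2, h3⟩
        · rintro ⟨h1, h2, h3⟩
          rcases List.mem_cons.mp h1 with rfl | h1
          · rcases hnbv with hv | hv
            · exact absurd hv h2
            · exact absurd hv h3
          · exact ⟨h1, h2, h3⟩

-- fresh nodes produced by a whole level, characterized
theorem pvLevelMem (neighbors : List (Int × List Int)) (O : List Int) (fr v : List Int) (x : Int) :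
    x ∈ (fr.foldl (pvLevel neighbors O) (v, [])).2
      ↔ x ∉ v ∧ x ∉ O ∧ ∃ c ∈ fr, x ∈ pvAdj neighbors c := by
  induction fr generalizing v with
  | nil => simp
  | cons c rest ih =>
      simp only [List.foldl_cons, pvLevel]
      rw [pvLevel_shift neighbors O rest ((pvAdj neighbors c).foldl (pvStepB O) (v, []))]
      rw [pvStepB_fst O (pvAdj neighbors c) v]
      simp only [List.mem_append]
      rw [pvStepB_mem O (pvAdj neighbors c) v x, ih (v ++ ((pvAdj neighbors c).foldl (pvStepB O) (v, [])).2)]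
      constructor
      · rintro (⟨h1, h2, h3⟩ | ⟨h1, h2, h3⟩)
        · exact ⟨h2, h3, c, List.mem_cons_self, h1⟩
        · exact ⟨fun hv => h1 (List.mem_append.mpr (Or.inl hv)), h2,
            h3.elim (fun a ha => ⟨a, List.mem_cons_of_mem _ ha.1, ha.2⟩)⟩
      · rintro ⟨h1, h2, a, ha, hx⟩
        by_cases hE : x ∈ ((pvAdj neighbors c).foldl (pvStepB O) (v, [])).2
        · exact Or.inl ((pvStepB_mem O (pvAdj neighbors c) v x).mp hE)
        · rcases List.mem_cons.mp ha with rfl | ha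
          · exact absurd ((pvStepB_mem O (pvAdj neighbors a) v x).mpr ⟨hx, h1, h2⟩) hE
          · refine Or.inr ⟨?_, h2, a, ha, hx⟩
            intro hv
            rcases List.mem_append.mp hv with hv | hv
            · exact h1 hv
            · exact hE hv

theorem pvCollect_mem (O vis rch acc adj : List Int) (x : Int) :
    x ∈ pvCollect O vis rch acc adj
      ↔ x ∈ acc ∨ (x ∈ adj ∧ x ∉ rch ∧ x ∉ vis ∧ x ∉ O) := by
  unfold pvCollect
  induction adj generalizing acc with
  | nil => simp
  | cons t rest ih =>
      simp only [List.foldl_cons]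
      by_cases hc : ((!PySem.Set.contains rch t) && (!PySem.Set.contains vis t) && (!O.contains t)) = true
      · rw [if_pos hc]
        have h1 : t ∉ rch := by
          have := ((Bool.and_eq_true _ _).mp ((Bool.and_eq_true _ _).mp hc).1).1
          simpa [PySem.Set.contains] using this
        have h2 : t ∉ vis := by
          have := ((Bool.and_eq_true _ _).mp ((Bool.and_eq_true _ _).mp hc).1).2
          simpa [PySem.Set.contains] using this
        have h3 : t ∉ O := by
          have := ((Bool.and_eq_true _ _).mp hc).2
          simpa using this
        rw [ih (PySem.Set.add acc t)]
        rw [PySem.Set.mem_add]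
        constructor
        · rintro ((ha | rfl) | ⟨ha, hb⟩)
          · exact Or.inl ha
          · exact Or.inr ⟨List.mem_cons_self, h1, h2, h3⟩
          · exact Or.inr ⟨List.mem_cons_of_mem _ ha, hb⟩
        · rintro (ha | ⟨ha, hb⟩)
          · exact Or.inl (Or.inl ha)
          · rcases List.mem_cons.mp ha with rfl | ha
            · exact Or.inl (Or.inr rfl)
            · exact Or.inr ⟨ha, hb⟩
      · rw [if_neg hc]
        have hor : t ∈ rch ∨ t ∈ vis ∨ t ∈ O := by
          by_contra hcon
          push Not at hcon
          exact hc (by simp [PySem.Set.contains, hcon.1, hcon.2.1, hcon.2.2])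
        rw [ih acc]
        constructor
        · rintro (ha | ⟨ha, hb⟩)
          · exact Or.inl ha
          · exact Or.inr ⟨List.mem_cons_of_mem _ ha, hb⟩
        · rintro (ha | ⟨ha, hb⟩)
          · exact Or.inl ha
          · rcases List.mem_cons.mp ha with rfl | ha
            · rcases hor with h | h | h
              · exact absurd h hb.1
              · exact absurd h hb.2.1
              · exact absurd h hb.2.2
            · exact Or.inr ⟨ha, hb⟩

theorem pvScan_mem_aux (neighbors : List (Int × List Int)) (O vis rch : List Int) (l acc : List Int) (x : Int) :
    x ∈ l.foldl (fun acc u => pvCollect O vis rch acc (pvAdj neighbors u)) acc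
      ↔ x ∈ acc ∨ ∃ u ∈ l, x ∈ pvAdj neighbors u ∧ x ∉ rch ∧ x ∉ vis ∧ x ∉ O := by
  induction l generalizing acc with
  | nil => simp
  | cons u rest ih =>
      simp only [List.foldl_cons]
      rw [ih (pvCollect O vis rch acc (pvAdj neighbors u)), pvCollect_mem]
      constructor
      · rintro ((ha | ⟨h1, h2, h3, h4⟩) | ⟨q, hq, hrest⟩)
        · exact Or.inl ha
        · exact Or.inr ⟨u, List.mem_cons_self, h1, h2, h3, h4⟩
        · exact Or.inr ⟨q, List.mem_cons_of_mem _ hq, hrest⟩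
      · rintro (ha | ⟨q, hq, h1, h2⟩)
        · exact Or.inl (Or.inl ha)
        · rcases List.mem_cons.mp hq with rfl | hq
          · exact Or.inl (Or.inr ⟨h1, h2⟩)
          · exact Or.inr ⟨q, hq, h1, h2⟩

theorem pvScan_mem (neighbors : List (Int × List Int)) (O vis rch : List Int) (x : Int) :
    x ∈ pvScan neighbors O vis rch
      ↔ ∃ u ∈ rch, x ∈ pvAdj neighbors u ∧ x ∉ rch ∧ x ∉ vis ∧ x ∉ O := by
  unfold pvScan
  rw [pvScan_mem_aux]
  simp [PySem.Set.empty]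

-- the scan over the whole edge list produces exactly the expansion of the frontier
theorem pvScan_eq_level (neighbors : List (Int × List Int)) (O : List Int)
    (vis rch fr v : List Int)
    (hmem : ∀ x, x ∈ v ↔ x ∈ vis ∨ x ∈ rch)
    (hfr : ∀ x ∈ fr, x ∈ rch)
    (hsat : ∀ u ∈ rch, u ∉ fr → ∀ t ∈ pvAdj neighbors u, t ∉ O → t ∉ vis → t ∈ rch)
    (x : Int) :
    x ∈ pvScan neighbors O vis rch ↔ x ∈ (fr.foldl (pvLevel neighbors O) (v, [])).2 := by
  rw [pvScan_mem, pvLevelMem]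
  constructor
  · rintro ⟨u, hu, hx, hnr, hnv, hno⟩
    by_cases hpf : u ∈ fr
    · exact ⟨fun hv => ((hmem x).mp hv).elim hnv hnr, hno, u, hpf, hx⟩
    · exact absurd (hsat u hu hpf x hx hno hnv) hnr
  · rintro ⟨hnv', hno, c, hc, hx⟩
    have hnr : x ∉ rch := fun h => hnv' ((hmem x).mpr (Or.inr h))
    have hnv : x ∉ vis := fun h => hnv' ((hmem x).mpr (Or.inl h))
    exact ⟨c, hfr c hc, hx, hnr, hnv, hno⟩

theorem pvClosure_depth_le (neighbors : List (Int × List Int)) (O : List Int)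
    (f : Nat) (vis rch : List Int) (d : Int) :
    d ≤ (pvClosure neighbors O f vis rch d).2 := by
  induction f generalizing rch d with
  | zero => simp [pvClosure]
  | succ g ih =>
      rw [pvClosure]
      by_cases h : (pvScan neighbors O vis rch).isEmpty
      · simp [h]
      · simp only [h, if_false, Bool.false_eq_true]
        exact le_trans (by omega) (ih (PySem.Set.update rch (pvScan neighbors O vis rch)) (d + 1))

theorem pvMaxIte (m d : Int) : (if d > m then d else m) = max m d := by
  rw [max_def]; split_ifs <;> omega

-- ---- the inner simulation: the level loop equals the closure loop ----
theorem pvInner (neighbors : List (Int × List Int)) (O : List Int) :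
    ∀ (fc fb : Nat) (vis rch fr v : List Int) (m d : Int),
    (∀ x, x ∈ v ↔ x ∈ vis ∨ x ∈ rch) →
    (∀ x ∈ fr, x ∈ rch) →
    (∀ u ∈ rch, u ∉ fr → ∀ t ∈ pvAdj neighbors u, t ∉ O → t ∉ vis → t ∈ rch) →
    fr.length + (pvU neighbors \ v.toFinset).card ≤ fb →
    (pvU neighbors \ v.toFinset).card < fc →
    fr ≠ [] →
    (∀ x, x ∈ (pvLoopB neighbors O fb v m fr d).1
        ↔ x ∈ vis ∨ x ∈ (pvClosure neighbors O fc vis rch d).1)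
    ∧ (pvLoopB neighbors O fb v m fr d).2 = max m (pvClosure neighbors O fc vis rch d).2 := by
  intro fc
  induction fc with
  | zero => intro fb vis rch fr v m d _ _ _ _ hfc _; omega
  | succ h ih =>
      intro fb vis rch fr v m d hmem hfr hsat hfb hfc hfr0
      match fr, hfr0 with
      | c :: fr', _ =>
      obtain ⟨g, rfl⟩ : ∃ g, fb = g + 1 := ⟨fb - 1, by simp at hfb; omega⟩
      rw [pvLoopB]
      obtain ⟨e1, e2, e3⟩ := pvLevelExpand_props neighbors O (c :: fr') v
      have hscanE : ∀ x, x ∈ pvScan neighbors O vis rch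
          ↔ x ∈ ((c :: fr').foldl (pvLevel neighbors O) (v, [])).2 :=
        pvScan_eq_level neighbors O vis rch (c :: fr') v hmem hfr hsat
      rw [pvClosure]
      by_cases hE : ((c :: fr').foldl (pvLevel neighbors O) (v, [])).2 = []
      · -- no fresh node: both loops stop in sync
        have hscan : pvScan neighbors O vis rch = [] := by
          refine List.eq_nil_iff_forall_not_mem.mpr (fun x hx => ?_)
          rw [hscanE x, hE] at hx
          exact absurd hx (List.not_mem_nil)
        rw [e1, hE]
        simp only [hscan, List.isEmpty_nil, if_pos, List.append_nil]
        rw [pvLoopB]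
        exact ⟨hmem, (pvMaxIte m d).symm ▸ rfl⟩
      · -- a fresh node exists: both loops step in sync
        have hscanne : ¬ (pvScan neighbors O vis rch).isEmpty = true := by
          obtain ⟨x, hx⟩ := List.exists_mem_of_ne_nil _ hE
          intro hemp
          rw [List.isEmpty_iff] at hemp
          exact absurd ((hscanE x).mpr hx) (by rw [hemp]; exact List.not_mem_nil)
        rw [if_neg hscanne, e1]
        have hcard := pvCard_step (pvU neighbors) v
          ((c :: fr').foldl (pvLevel neighbors O) (v, [])).2 e2 e3
        have hElen : 0 < ((c :: fr').foldl (pvLevel neighbors O) (v, [])).2.length :=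
          List.length_pos_of_ne_nil hE
        have hmem' : ∀ x, x ∈ v ++ ((c :: fr').foldl (pvLevel neighbors O) (v, [])).2
            ↔ x ∈ vis ∨ x ∈ PySem.Set.update rch (pvScan neighbors O vis rch) := by
          intro x
          rw [List.mem_append, hmem x, PySem.Set.mem_update, ← hscanE x]
          tauto
        have hfr' : ∀ x ∈ ((c :: fr').foldl (pvLevel neighbors O) (v, [])).2,
            x ∈ PySem.Set.update rch (pvScan neighbors O vis rch) := by
          intro x hx
          rw [PySem.Set.mem_update]
          exact Or.inr ((hscanE x).mpr hx)
        have hsat' : ∀ u ∈ PySem.Set.update rch (pvScan neighbors O vis rch),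
            u ∉ ((c :: fr').foldl (pvLevel neighbors O) (v, [])).2 →
            ∀ t ∈ pvAdj neighbors u, t ∉ O → t ∉ vis →
            t ∈ PySem.Set.update rch (pvScan neighbors O vis rch) := by
          intro u hu huE t ht htO htv
          rw [PySem.Set.mem_update] at hu
          have hur : u ∈ rch := by
            rcases hu with hu | hu
            · exact hu
            · exact absurd ((hscanE u).mp hu) huE
          rw [PySem.Set.mem_update]
          by_cases htr : t ∈ rch
          · exact Or.inl htr
          · exact Or.inr ((pvScan_mem neighbors O vis rch t).mpr ⟨u, hur, ht, htr, htv, htO⟩)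
        have hfb' : ((c :: fr').foldl (pvLevel neighbors O) (v, [])).2.length +
            (pvU neighbors \ (v ++ ((c :: fr').foldl (pvLevel neighbors O) (v, [])).2).toFinset).card
            ≤ g - fr'.length := by
          simp only [List.length_cons] at hfb
          omega
        have hfc' : (pvU neighbors \ (v ++ ((c :: fr').foldl (pvLevel neighbors O) (v, [])).2).toFinset).card < h := by
          omega
        obtain ⟨ihm, ihv⟩ := ih (g - fr'.length) vis
          (PySem.Set.update rch (pvScan neighbors O vis rch))
          ((c :: fr').foldl (pvLevel neighbors O) (v, [])).2
          (v ++ ((c :: fr').foldl (pvLevel neighbors O) (v, [])).2)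
          (if d > m then d else m) (d + 1)
          hmem' hfr' hsat' hfb' hfc' hE
        refine ⟨ihm, ?_⟩
        rw [ihv, pvMaxIte m d]
        have hdle : d ≤ (pvClosure neighbors O h vis
            (PySem.Set.update rch (pvScan neighbors O vis rch)) (d + 1)).2 :=
          le_trans (by omega) (pvClosure_depth_le neighbors O h vis _ (d + 1))
        rw [max_assoc, max_eq_right hdle]

-- ---- the outer simulation ----
theorem pvOuterSim (neighbors : List (Int × List Int)) (O : List Int)
    (F : Nat) (hF : pvTotal neighbors + 1 ≤ F) :
    ∀ (l : List Int),
    ∀ (s t : List Int × Int), (∀ x, x ∈ s.1 ↔ x ∈ t.1) → s.2 = t.2 →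
    (l.foldl (fun (s : List Int × Int) node =>
        if PySem.Set.contains s.1 node then s
        else pvLoopB neighbors O F (PySem.Set.add s.1 node) s.2 [node] 0) s).2
    = (l.foldl (fun (s : List Int × Int) node =>
        if PySem.Set.contains s.1 node then s
        else
          let r := pvClosure neighbors O (pvTotal neighbors + 1) s.1 [node] 0
          (PySem.Set.update s.1 r.1, if r.2 > s.2 then r.2 else s.2)) t).2 := by
  intro l
  induction l with
  | nil => intro s t _ hm2; exact hm2
  | cons c rest ih =>
      intro s t hm1 hm2
      simp only [List.foldl_cons]
      by_cases hc : PySem.Set.contains t.1 c = true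
      · have hcs : PySem.Set.contains s.1 c = true := by
          rw [PySem.Set.contains_iff] at hc ⊢
          exact (hm1 c).mpr hc
        rw [if_pos hcs, if_pos hc]
        exact ih s t hm1 hm2
      · have hcs : ¬ PySem.Set.contains s.1 c = true := by
          rw [PySem.Set.contains_iff] at hc ⊢
          exact fun h => hc ((hm1 c).mp h)
        rw [if_neg hcs, if_neg hc]
        have hcard : (pvU neighbors \ (PySem.Set.add s.1 c).toFinset).card ≤ pvTotal neighbors := by
          have hle := Finset.card_le_card
            (Finset.sdiff_subset (s := pvU neighbors) (t := (PySem.Set.add s.1 c).toFinset))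
          have := pvU_card_le neighbors
          omega
        obtain ⟨hm, hv2⟩ := pvInner neighbors O (pvTotal neighbors + 1) F
          t.1 [c] [c] (PySem.Set.add s.1 c) s.2 0
          (by
            intro x
            rw [PySem.Set.mem_add, hm1 x]
            simp)
          (fun x hx => hx)
          (by
            intro u hu huf
            exact absurd hu huf)
          (by simp only [List.length_cons, List.length_nil]; omega)
          (by omega)
          (by simp)
        refine ih _ _ (fun x => (hm x).trans (PySem.Set.mem_update _ _ _).symm) ?_
        rw [hv2, hm2, pvMaxIte]

-- ===== VERDICT (by name: the statement is the Claim_ definition above) =====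
theorem get_max_depth_spec : Claim_equal_get_max_depth := by
  intro neighbors boundary_nodes ocean_nodes _ hPre
  unfold Spec_get_max_depth get_max_depth get_max_depth_alt
  rcases hPre with rfl | _hkeys
  · rfl
  rw [pv_outerAB neighbors ocean_nodes (boundary_nodes.length + pvTotal neighbors + 1)
      (by have := pvU_card_le neighbors; omega)]
  exact pvOuterSim neighbors ocean_nodes _
    (by omega) boundary_nodes (PySem.Set.empty, 0) (PySem.Set.empty, 0) (fun x => Iff.rfl) rfl
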